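-- pv_equiv track=rewrite | github.com/eduardagarici/HTR | Code/Data preprocessing/DataLoader.py | truncateLabel
-- ===== SOURCE A (Python) =====
-- def truncateLabel(line, maxTextLenght):
--
--     cost = 0
--     for i in range(len(line)):
--         if i != 0 and line[i] == line[i - 1]:
--             cost += 2
--         else:
--             cost += 1
--         if cost > maxTextLenght:
--             return line[:i]
--     return line
-- ===== SOURCE B (Python) =====
-- def truncateLabel(line, maxTextLenght):
--     # Precompute the full prefix-cost table (strictly increasing), then binary-search
--     # for the first index whose cost exceeds the limit.
--     costs = []
--     total = 0
--     prev = None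
--     for ch in line:
--         total += 2 if prev == ch else 1
--         costs.append(total)
--         prev = ch
--     lo, hi = 0, len(costs)
--     while lo < hi:
--         mid = (lo + hi) // 2
--         if costs[mid] <= maxTextLenght:
--             lo = mid + 1
--         else:
--             hi = mid
--     if lo < len(costs):
--         return line[:lo]
--     return line
-- ===== Notes on version B (the rewrite author's own statement) =====
-- stated objective: alternative
-- what changed: Replaces A's single early-exit scan (return inside the loop as soon as the running cost exceeds the limit) by a two-phase decomposition: one full pass builds the strictly increasing prefix-cost table, then a hand-written binary search finds the first index whose cost exceeds maxTextLenght and the slice is taken there.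
import Mathlib
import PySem

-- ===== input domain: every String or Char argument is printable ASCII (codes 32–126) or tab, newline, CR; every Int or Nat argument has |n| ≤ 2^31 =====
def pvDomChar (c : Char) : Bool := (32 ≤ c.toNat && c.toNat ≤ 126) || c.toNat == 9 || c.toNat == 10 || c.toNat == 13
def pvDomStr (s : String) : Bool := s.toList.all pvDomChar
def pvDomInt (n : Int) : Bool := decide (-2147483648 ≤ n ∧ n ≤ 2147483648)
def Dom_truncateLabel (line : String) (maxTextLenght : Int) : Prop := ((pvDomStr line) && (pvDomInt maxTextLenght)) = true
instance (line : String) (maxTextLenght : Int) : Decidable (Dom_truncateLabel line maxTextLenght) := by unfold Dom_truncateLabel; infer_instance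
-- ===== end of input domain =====

-- B replaces A's early-exit scan by a precomputed prefix-cost table plus a hand-written
-- binary search for the first index whose cost exceeds the limit (alternative decomposition).


-- ===== PORT A =====
-- A's for-loop over range(len(line)): structural recursion over the remaining characters,
-- carrying the index i and the previous character (line[i-1]; none for i = 0), so that
-- 'i != 0 and line[i] == line[i-1]' is exactly 'prev = some c'; 'return line[:i]' with
-- 0 ≤ i ≤ len(line) is exactly take i.
def truncA (line : List Char) (m : Int) : Int → Nat → Option Char → List Char → String
  | _, _, _, [] => String.ofList line
  | cost, i, prev, c :: rest =>
    let cost' := cost + (if prev = some c then 2 else 1)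
    if cost' > m then String.ofList (line.take i)
    else truncA line m cost' (i + 1) (some c) rest

def truncateLabel (line : String) (maxTextLenght : Int) : String :=
  truncA line.toList maxTextLenght 0 0 none line.toList

-- ===== PORT B =====
-- first pass of Source B: build the prefix-cost list (prev carried exactly as in Source B)
def bCosts : Option Char → Int → List Char → List Int
  | _, _, [] => []
  | prev, total, c :: rest =>
    let t := total + (if prev = some c then 2 else 1)
    t :: bCosts (some c) t rest

-- the hand-written binary-search loop of Source B (costs[mid] is in range whenever
-- lo < hi ≤ length, so getD is exact there)
def bSearch (costs : List Int) (m : Int) (lo hi : Nat) : Nat :=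
  if _h : lo < hi then
    let mid := (lo + hi) / 2
    if costs.getD mid 0 ≤ m then bSearch costs m (mid + 1) hi
    else bSearch costs m lo mid
  else lo
  termination_by hi - lo
  decreasing_by all_goals omega

def truncateLabel_alt (line : String) (maxTextLenght : Int) : String :=
  let cs := line.toList
  let costs := bCosts none 0 cs
  let lo := bSearch costs maxTextLenght 0 costs.length
  if lo < costs.length then String.ofList (cs.take lo) else line

-- ===== PRECONDITION & SPEC =====
def Spec_truncateLabel (line : String) (maxTextLenght : Int) (out : String) : Prop := out = truncateLabel_alt line maxTextLenght
instance (line : String) (maxTextLenght : Int) (out : String) : Decidable (Spec_truncateLabel line maxTextLenght out) := by unfold Spec_truncateLabel; infer_instance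

-- ===== CLAIM (what is proved, stated in full; the proofs are below) =====
def Claim_equal_truncateLabel : Prop := ∀ (line : String) (maxTextLenght : Int), Dom_truncateLabel line maxTextLenght → Spec_truncateLabel line maxTextLenght (truncateLabel line maxTextLenght)

-- ===== LEMMAS AND PROOFS =====

-- reference: relative index of the first prefix whose cost exceeds m, if any
def firstBad (m : Int) : Int → Option Char → List Char → Option Nat
  | _, _, [] => none
  | t, prev, c :: rest =>
    let t' := t + (if prev = some c then 2 else 1)
    if t' > m then some 0
    else (firstBad m t' (some c) rest).map (· + 1)

theorem length_bCosts (prev : Option Char) (t : Int) (cs : List Char) :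
    (bCosts prev t cs).length = cs.length := by
  induction cs generalizing prev t with
  | nil => rfl
  | cons c rest ih => simp [bCosts, ih]

-- once the running cost has passed m, every later table entry is past m too
theorem bCosts_gt (m : Int) (cs : List Char) (prev : Option Char) (t : Int) (ht : m ≤ t) :
    ∀ k, k < cs.length → ¬ (bCosts prev t cs).getD k 0 ≤ m := by
  induction cs generalizing prev t with
  | nil => intro k hk; simp at hk
  | cons c rest ih =>
    intro k hk
    match k with
    | 0 => simp [bCosts]; split <;> omega
    | k + 1 =>
      simp only [bCosts, List.getD_cons_succ]
      exact ih (some c) _ (by split <;> omega) k (by simpa [List.length_cons] using hk)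

-- characterisation of the cost table: entry k is within budget iff k lies before the first
-- bad index
theorem bCosts_le_iff (m : Int) (cs : List Char) (prev : Option Char) (t : Int) :
    ∀ k, k < cs.length →
      ((bCosts prev t cs).getD k 0 ≤ m ↔
        (match firstBad m t prev cs with | none => True | some j => k < j)) := by
  induction cs generalizing prev t with
  | nil => intro k hk; simp at hk
  | cons c rest ih =>
    intro k hk
    simp only [bCosts, firstBad]
    by_cases hbad : t + (if prev = some c then 2 else 1) > m
    · rw [if_pos hbad]
      match k with
      | 0 => exact iff_of_false (by simp; omega) (by simp)
      | k + 1 =>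
        rw [List.getD_cons_succ]
        refine iff_of_false
          (bCosts_gt m rest (some c) _ (by omega) k (by simpa [List.length_cons] using hk)) ?_
        simp
    · rw [if_neg hbad]
      match k with
      | 0 =>
        rw [List.getD_cons_zero]
        cases hfb : firstBad m (t + (if prev = some c then 2 else 1)) (some c) rest
        · simp; omega
        · simp; omega
      | k + 1 =>
        rw [List.getD_cons_succ]
        have := ih (some c) (t + (if prev = some c then 2 else 1)) k
          (by simpa [List.length_cons] using hk)
        cases hfb : firstBad m (t + (if prev = some c then 2 else 1)) (some c) rest <;>
          rw [hfb] at this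
        · simpa using this
        · simp at this ⊢; omega

theorem firstBad_lt (m : Int) (cs : List Char) (prev : Option Char) (t : Int) (j : Nat)
    (h : firstBad m t prev cs = some j) : j < cs.length := by
  induction cs generalizing prev t j with
  | nil => simp [firstBad] at h
  | cons c rest ih =>
    simp only [firstBad] at h
    by_cases hb : t + (if prev = some c then 2 else 1) > m
    · rw [if_pos hb] at h
      cases h; simp
    · rw [if_neg hb] at h
      rcases Option.map_eq_some_iff.mp h with ⟨j', hj', rfl⟩
      have := ih _ _ _ hj'
      simp only [List.length_cons]; omega

-- the binary search returns J, the first index with cost > m (J = length if there is none),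
-- as long as J ∈ [lo, hi] and the table satisfies the threshold characterisation
theorem bSearch_eq (costs : List Int) (m : Int) (J : Nat)
    (hchar : ∀ k, k < costs.length → (costs.getD k 0 ≤ m ↔ k < J)) :
    ∀ lo hi, hi ≤ costs.length → lo ≤ J → J ≤ hi → bSearch costs m lo hi = J := by
  intro lo hi
  induction hn : hi - lo using Nat.strong_induction_on generalizing lo hi with
  | _ n ih =>
    intro hhi hloJ hJhi
    rw [bSearch]
    by_cases h : lo < hi
    · simp only [dif_pos h]
      have hmlt : (lo + hi) / 2 < hi := by omega
      have hc := hchar ((lo + hi) / 2) (by omega)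
      by_cases hle : costs.getD ((lo + hi) / 2) 0 ≤ m
      · have : (lo + hi) / 2 < J := hc.mp hle
        rw [if_pos hle]
        exact ih (hi - ((lo + hi) / 2 + 1)) (by omega) _ hi rfl hhi (by omega) hJhi
      · have : ¬ (lo + hi) / 2 < J := fun hlt => hle (hc.mpr hlt)
        rw [if_neg hle]
        exact ih ((lo + hi) / 2 - lo) (by omega) lo _ rfl (by omega) hloJ (by omega)
    · simp only [dif_neg h]; omega

-- A's loop, characterised by firstBad
theorem truncA_eq (line : List Char) (m : Int) (cs : List Char) :
    ∀ (t : Int) (i : Nat) (prev : Option Char),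
      truncA line m t i prev cs =
        (match firstBad m t prev cs with
          | none => String.ofList line
          | some j => String.ofList (line.take (i + j))) := by
  induction cs with
  | nil => intro t i prev; simp [truncA, firstBad]
  | cons c rest ih =>
    intro t i prev
    simp only [truncA, firstBad]
    by_cases hb : t + (if prev = some c then 2 else 1) > m
    · simp [hb]
    · rw [if_neg hb, if_neg hb, ih]
      cases hfb : firstBad m (t + (if prev = some c then 2 else 1)) (some c) rest
      · simp
      · simp [Nat.add_assoc, Nat.add_comm 1]

-- main equivalence
theorem trunc_main (line : String) (m : Int) :
    truncateLabel line m = truncateLabel_alt line m := by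
  simp only [truncateLabel, truncateLabel_alt]
  have hlen := length_bCosts none 0 line.toList
  rcases hfb : firstBad m 0 none line.toList with _ | j
  · -- no prefix exceeds: the search returns length, both sides return line
    have hJ : bSearch (bCosts none 0 line.toList) m 0 (bCosts none 0 line.toList).length
        = (bCosts none 0 line.toList).length := by
      refine bSearch_eq _ m _ (fun k hk => ?_) 0 _ le_rfl (Nat.zero_le _) le_rfl
      have h2 := bCosts_le_iff m line.toList none 0 k (by omega)
      rw [hfb] at h2
      exact iff_of_true (h2.mpr trivial) hk
    rw [truncA_eq, hfb, hJ]
    simp [String.ofList_toList]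
  · have hjlt : j < line.toList.length := firstBad_lt m line.toList none 0 j hfb
    have hJ : bSearch (bCosts none 0 line.toList) m 0 (bCosts none 0 line.toList).length = j := by
      refine bSearch_eq _ m j (fun k hk => ?_) 0 _ le_rfl (Nat.zero_le _) (by omega)
      have h2 := bCosts_le_iff m line.toList none 0 k (by omega)
      rw [hfb] at h2
      exact h2
    rw [truncA_eq, hfb, hJ, if_pos (by omega)]
    simp

-- ===== VERDICT (by name: the statement is the Claim_ definition above) =====
theorem truncateLabel_spec : Claim_equal_truncateLabel := by
  intro line m _
  exact trunc_main line m
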